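-- pv_equiv track=rewrite | github.com/IvanMez/Genecalc | genecalc.py | FindGamets
-- ===== SOURCE A (Python) =====
-- def FindGamets(AllGenes, CurrGamet=''):
--     if len(AllGenes)>1: #Если осталось рассмотреть больше 1 гена
--         if AllGenes[0][0] == AllGenes[0][1]: #Ген гомозиготен, рекурсия (Перебор) одной буквы
--             return (FindGamets(AllGenes[1:],CurrGamet+AllGenes[0][0]))
--         else: #Ген гетерозиготен, рекурсия (Перебор) двух букв
--             return (FindGamets(AllGenes[1:],CurrGamet+AllGenes[0][0]) + FindGamets(AllGenes[1:],CurrGamet+AllGenes[0][1]))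
--     else: #Если осталось рассмотреть последний ген
--         if AllGenes[0][0] == AllGenes[0][1]:
--             FoundGamets = [CurrGamet + AllGenes[0][0]]
--         else:
--             FoundGamets = [CurrGamet + AllGenes[0][0]] + [CurrGamet + AllGenes[0][1]]
--         return FoundGamets # Развёртка стэка
-- ===== SOURCE B (Python) =====
-- def FindGamets(AllGenes, CurrGamet=''):
--     # iterative left-to-right accumulation instead of tree recursion
--     g = AllGenes[0]
--     if g[0] == g[1]:
--         res = [CurrGamet + g[0]]
--     else:
--         res = [CurrGamet + g[0], CurrGamet + g[1]]
--     for g in AllGenes[1:]: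
--         if g[0] == g[1]:
--             res = [p + g[0] for p in res]
--         else:
--             res = [p + x for p in res for x in (g[0], g[1])]
--     return res
-- ===== Notes on version B (the rewrite author's own statement) =====
-- stated objective: simpler
-- what changed: Replaced the tree recursion over the gene list with a single iterative left-to-right pass that extends an accumulator list of partial gametes gene by gene.
import Mathlib
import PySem

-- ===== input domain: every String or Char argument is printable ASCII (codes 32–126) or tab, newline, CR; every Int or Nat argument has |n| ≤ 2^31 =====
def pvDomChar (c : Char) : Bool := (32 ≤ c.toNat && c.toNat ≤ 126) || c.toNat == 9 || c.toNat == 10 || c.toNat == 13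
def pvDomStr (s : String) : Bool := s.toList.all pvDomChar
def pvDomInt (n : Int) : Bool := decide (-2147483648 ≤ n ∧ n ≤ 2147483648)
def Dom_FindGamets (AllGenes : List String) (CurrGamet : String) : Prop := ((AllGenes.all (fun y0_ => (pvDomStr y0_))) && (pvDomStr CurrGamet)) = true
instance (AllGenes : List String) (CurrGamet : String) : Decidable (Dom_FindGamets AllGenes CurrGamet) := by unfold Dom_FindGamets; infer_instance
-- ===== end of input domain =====

-- B replaces A's tree recursion by one iterative left-to-right pass over the genes
-- extending an accumulator of partial gametes; return values agree on Pre_ (see below).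

-- g[i] for a gene string; inside Pre_ the index is always in range (the default is never hit).
def pvGeneCh (g : String) (i : Int) : Char := (PySem.Str.pyGet? g i).getD ' '

-- ===== PORT A =====
def FindGamets (AllGenes : List String) (CurrGamet : String) : List String :=
  match AllGenes with
  | [] => []  -- Python raises IndexError here (excluded by Pre_)
  | [g] =>    -- len(AllGenes) > 1 is false: last gene
      if pvGeneCh g 0 = pvGeneCh g 1 then
        [CurrGamet.push (pvGeneCh g 0)]
      else
        [CurrGamet.push (pvGeneCh g 0)] ++ [CurrGamet.push (pvGeneCh g 1)]
  | g :: rest =>   -- len(AllGenes) > 1: recurse on AllGenes[1:]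
      if pvGeneCh g 0 = pvGeneCh g 1 then
        FindGamets rest (CurrGamet.push (pvGeneCh g 0))
      else
        FindGamets rest (CurrGamet.push (pvGeneCh g 0)) ++
        FindGamets rest (CurrGamet.push (pvGeneCh g 1))

-- ===== PORT B =====
-- one loop step: extend every partial gamete by the allele(s) of gene g
def pvExtend (res : List String) (g : String) : List String :=
  if pvGeneCh g 0 = pvGeneCh g 1 then
    res.map (fun p => p.push (pvGeneCh g 0))
  else
    res.flatMap (fun p => [p.push (pvGeneCh g 0), p.push (pvGeneCh g 1)])

def FindGamets_alt (AllGenes : List String) (CurrGamet : String) : List String :=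
  match AllGenes with
  | [] => []  -- Python raises IndexError here (excluded by Pre_)
  | g :: rest =>
      let seed :=
        if pvGeneCh g 0 = pvGeneCh g 1 then
          [CurrGamet.push (pvGeneCh g 0)]
        else
          [CurrGamet.push (pvGeneCh g 0), CurrGamet.push (pvGeneCh g 1)]
      rest.foldl pvExtend seed

-- ===== PRECONDITION & SPEC =====
-- Pre_ excludes exactly the inputs on which Python A raises IndexError: an empty gene list,
-- or a gene string with fewer than 2 characters.
def Pre_FindGamets (AllGenes : List String) (CurrGamet : String) : Prop :=
  AllGenes ≠ [] ∧ ∀ g ∈ AllGenes, 2 ≤ g.toList.length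
instance (AllGenes : List String) (CurrGamet : String) : Decidable (Pre_FindGamets AllGenes CurrGamet) := by unfold Pre_FindGamets; infer_instance

def pvWitness_FindGamets : List String × String := (["Aa", "BB"], "")

def Spec_FindGamets (AllGenes : List String) (CurrGamet : String) (out : List String) : Prop := out = FindGamets_alt AllGenes CurrGamet
instance (AllGenes : List String) (CurrGamet : String) (out : List String) : Decidable (Spec_FindGamets AllGenes CurrGamet out) := by unfold Spec_FindGamets; infer_instance

-- ===== CLAIM (what is proved, stated in full; the proofs are below) =====
def Claim_equal_FindGamets : Prop := ∀ (AllGenes : List String) (CurrGamet : String), Dom_FindGamets AllGenes CurrGamet → Pre_FindGamets AllGenes CurrGamet → Spec_FindGamets AllGenes CurrGamet (FindGamets AllGenes CurrGamet)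

-- ===== LEMMAS AND PROOFS =====

lemma pvExtend_append (x y : List String) (g : String) :
    pvExtend (x ++ y) g = pvExtend x g ++ pvExtend y g := by
  unfold pvExtend; split_ifs <;> simp

lemma foldl_pvExtend_append (t : List String) (x y : List String) :
    t.foldl pvExtend (x ++ y) = t.foldl pvExtend x ++ t.foldl pvExtend y := by
  induction t generalizing x y with
  | nil => simp
  | cons h t ih => simp [List.foldl_cons, pvExtend_append, ih]

lemma pvExtend_seed (C : String) (g h : String) :
    pvExtend (if pvGeneCh g 0 = pvGeneCh g 1 then [C.push (pvGeneCh g 0)]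
              else [C.push (pvGeneCh g 0), C.push (pvGeneCh g 1)]) h
    = (if pvGeneCh g 0 = pvGeneCh g 1 then
         (if pvGeneCh h 0 = pvGeneCh h 1 then [(C.push (pvGeneCh g 0)).push (pvGeneCh h 0)]
          else [(C.push (pvGeneCh g 0)).push (pvGeneCh h 0), (C.push (pvGeneCh g 0)).push (pvGeneCh h 1)])
       else
         (if pvGeneCh h 0 = pvGeneCh h 1 then [(C.push (pvGeneCh g 0)).push (pvGeneCh h 0)]
          else [(C.push (pvGeneCh g 0)).push (pvGeneCh h 0), (C.push (pvGeneCh g 0)).push (pvGeneCh h 1)]) ++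
         (if pvGeneCh h 0 = pvGeneCh h 1 then [(C.push (pvGeneCh g 1)).push (pvGeneCh h 0)]
          else [(C.push (pvGeneCh g 1)).push (pvGeneCh h 0), (C.push (pvGeneCh g 1)).push (pvGeneCh h 1)])) := by
  unfold pvExtend; split_ifs <;> simp

lemma FindGamets_cons_eq_fold (rest : List String) (g : String) (C : String) :
    FindGamets (g :: rest) C =
    rest.foldl pvExtend
      (if pvGeneCh g 0 = pvGeneCh g 1 then [C.push (pvGeneCh g 0)]
       else [C.push (pvGeneCh g 0), C.push (pvGeneCh g 1)]) := by
  induction rest generalizing g C with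
  | nil =>
    simp only [FindGamets, List.foldl_nil]
    split_ifs <;> simp
  | cons h t ih =>
    simp only [List.foldl_cons, pvExtend_seed]
    by_cases hg : pvGeneCh g 0 = pvGeneCh g 1
    · simp only [FindGamets, if_pos hg]
      rw [ih]
    · simp only [FindGamets, if_neg hg]
      rw [ih, ih, foldl_pvExtend_append]

-- ===== VERDICT (by name: the statement is the Claim_ definition above) =====
theorem FindGamets_spec : Claim_equal_FindGamets := by
  intro AllGenes CurrGamet _ hPre
  unfold Spec_FindGamets FindGamets_alt
  match AllGenes, hPre with
  | [], ⟨hne, _⟩ => exact absurd rfl hne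
  | g :: rest, _ => exact FindGamets_cons_eq_fold rest g CurrGamet
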